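-- pv_equiv track=rewrite | github.com/roby-avo/moose | scripts/build_schemaorg_artifacts.py | compute_ancestors
-- ===== SOURCE A (Python) =====
-- def compute_ancestors(class_parents: dict[str, list[str]]) -> dict[str, list[str]]:
--     """
--     Compute transitive ancestors for each class id.
--     """
--     memo: dict[str, list[str]] = {}
--     visiting: set[str] = set()
--
--     def dfs(c: str) -> list[str]:
--         if c in memo:
--             return memo[c]
--         if c in visiting:
--             # cycle guard
--             return []
--         visiting.add(c)
--         ancestors: list[str] = []
--         for p in class_parents.get(c, []):
--             if p not in ancestors:
--                 ancestors.append(p)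
--             for ap in dfs(p):
--                 if ap not in ancestors:
--                     ancestors.append(ap)
--         visiting.remove(c)
--         memo[c] = ancestors
--         return ancestors
--
--     for c in class_parents.keys():
--         dfs(c)
--     return memo
-- ===== SOURCE B (Python) =====
-- def compute_ancestors(class_parents: dict[str, list[str]]) -> dict[str, list[str]]:
--     """
--     Compute transitive ancestors for each class id.
--
--     Iterative depth-first search with an explicit stack of frames instead of
--     recursion: each frame holds (node, remaining parents, ancestors built so far).
--     """
--     memo: dict[str, list[str]] = {}
--     for root in class_parents:
--         if root in memo:
--             continue
--         visiting = {root}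
--         stack = [[root, list(class_parents.get(root, [])), []]]
--         while stack:
--             node, remaining, anc = stack[-1]
--             if remaining:
--                 p = remaining.pop(0)
--                 if p not in anc:
--                     anc.append(p)
--                 if p in memo:
--                     for ap in memo[p]:
--                         if ap not in anc:
--                             anc.append(ap)
--                 elif p not in visiting:
--                     visiting.add(p)
--                     stack.append([p, list(class_parents.get(p, [])), []])
--             else:
--                 stack.pop()
--                 memo[node] = anc
--                 visiting.discard(node)
--                 if stack:
--                     parent_anc = stack[-1][2]
--                     for ap in anc:
--                         if ap not in parent_anc:
--                             parent_anc.append(ap)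
--     return memo
-- ===== Notes on version B (the rewrite author's own statement) =====
-- stated objective: alternative
-- what changed: Replaces A's recursive memoized DFS (nested def dfs with Python recursion) by an iterative DFS driven by an explicit stack of (node, remaining-parents, ancestors) frames, preserving the exact append/dedup order, memoization and cycle-guard behaviour without recursion.
import Mathlib
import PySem

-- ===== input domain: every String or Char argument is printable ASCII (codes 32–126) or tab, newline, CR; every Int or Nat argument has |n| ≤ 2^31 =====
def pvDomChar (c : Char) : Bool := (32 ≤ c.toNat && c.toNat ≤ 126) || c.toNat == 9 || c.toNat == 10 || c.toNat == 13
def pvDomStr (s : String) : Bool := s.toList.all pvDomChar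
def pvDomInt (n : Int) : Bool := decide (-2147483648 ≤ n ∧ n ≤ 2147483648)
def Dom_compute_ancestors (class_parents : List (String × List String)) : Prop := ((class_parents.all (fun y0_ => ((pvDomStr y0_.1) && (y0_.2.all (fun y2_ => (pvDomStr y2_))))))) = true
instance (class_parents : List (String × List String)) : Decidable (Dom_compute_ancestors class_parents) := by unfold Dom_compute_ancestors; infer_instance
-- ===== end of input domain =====

-- B replaces A's recursive memoized DFS by an iterative DFS over an explicit stack of
-- (node, remaining parents, ancestors) frames; same results, no recursion (objective: alternative).

-- ===== PORT A =====
-- A's nested `def dfs` is recursive; the port carries a fuel argument as a pure termination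
-- guard (one unit per descent into a fresh node; `compute_ancestors` passes more fuel than
-- there are distinct class names, so the 0-fuel branch is never reached).
mutual
def pvDfsA (cps : List (String × List String)) :
    Nat → PySem.Dict String (List String) → PySem.Set String → String →
    (List String × PySem.Dict String (List String))
  | f, memo, visiting, c =>
    match memo.get? c with
    | some v => (v, memo)                                   -- if c in memo: return memo[c]
    | none =>
      if PySem.Set.contains visiting c then ([], memo)      -- cycle guard
      else
        match f with
        | 0 => ([], memo)                                   -- fuel guard (unreachable)
        | f' + 1 =>
          let r := pvDfsLoopA cps f' ((PySem.Dict.mk cps).getD c []) [] memo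
                     (PySem.Set.add visiting c)
          (r.1, r.2.insert c r.1)                           -- memo[c] = ancestors
termination_by f _ _ _ => (f, 0)
def pvDfsLoopA (cps : List (String × List String)) :
    Nat → List String → List String → PySem.Dict String (List String) → PySem.Set String →
    (List String × PySem.Dict String (List String))
  | _, [], anc, memo, _ => (anc, memo)
  | f, p :: ps, anc, memo, visiting =>
    let anc1 := if anc.contains p then anc else anc ++ [p]
    let r := pvDfsA cps f memo visiting p
    let anc2 := r.1.foldl (fun a ap => if a.contains ap then a else a ++ [ap]) anc1
    pvDfsLoopA cps f ps anc2 r.2 visiting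
termination_by f ps _ _ _ => (f, ps.length + 1)
end


def compute_ancestors (class_parents : List (String × List String)) : List (String × List String) :=
  (((PySem.Dict.mk class_parents).keys).foldl
    (fun memo c =>
      (pvDfsA class_parents
        (class_parents.length + (class_parents.map (fun q => q.2.length)).sum + 1)
        memo PySem.Set.empty c).2)
    PySem.Dict.empty).items

-- ===== PORT B =====
-- a frame is (fuel, node, remaining parents, ancestors built so far); the per-frame fuel is
-- only a termination guard (never exhausted for the fuel compute_ancestors_alt passes).
def pvMaxVal (cps : List (String × List String)) : Nat :=
  cps.foldr (fun q m => max q.2.length m) 0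

def pvFw (W : Nat) (fr : Nat × String × List String × List String) : Nat :=
  (fr.2.2.1.length + 1) * W ^ fr.1

def pvMu (W : Nat) (st : List (Nat × String × List String × List String)) : Nat :=
  (st.map (pvFw W)).sum

-- termination fact for pvRunB: a pushed frame's parent list is bounded by pvMaxVal
theorem pvGetD_len_le (cps : List (String × List String)) (p : String) :
    ((PySem.Dict.mk cps).getD p []).length ≤ pvMaxVal cps := by
  induction cps with
  | nil => simp [PySem.Dict.getD, PySem.Dict.get?, pvMaxVal]
  | cons q rest ih =>
    rw [PySem.Dict.getD_eq_get?_getD, PySem.Dict.get?_mk_cons]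
    rw [PySem.Dict.getD_eq_get?_getD] at ih
    by_cases h : q.1 == p
    · simp [h, pvMaxVal]
    · simp only [h, Bool.false_eq_true, ↓reduceIte, pvMaxVal, List.foldr]
      exact le_trans ih (le_max_right _ _)

def pvRunB (cps : List (String × List String)) :
    List (Nat × String × List String × List String) →
    PySem.Dict String (List String) → PySem.Set String → PySem.Dict String (List String)
  | [], memo, _ => memo
  | (g, node, rem, anc) :: S, memo, visiting =>
    match rem with
    | [] =>                                                  -- frame finished: pop
      let memo' := memo.insert node anc
      let vis' := PySem.Set.discard visiting node
      match S with
      | [] => memo'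
      | (g2, n2, rem2, anc2) :: S2 =>                        -- splice into the frame below
        pvRunB cps
          ((g2, n2, rem2,
            anc.foldl (fun a ap => if a.contains ap then a else a ++ [ap]) anc2) :: S2)
          memo' vis'
    | p :: rem' =>
      let anc1 := if anc.contains p then anc else anc ++ [p]
      match memo.get? p with
      | some r =>                                            -- memoized: splice, no push
        pvRunB cps
          ((g, node, rem',
            r.foldl (fun a ap => if a.contains ap then a else a ++ [ap]) anc1) :: S) memo visiting
      | none =>
        if PySem.Set.contains visiting p then                -- on the stack: contributes nothing
          pvRunB cps ((g, node, rem', anc1) :: S) memo visiting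
        else
          match g with
          | 0 => pvRunB cps ((0, node, rem', anc1) :: S) memo visiting   -- fuel guard (unreachable)
          | g' + 1 =>                                        -- push a fresh frame
            pvRunB cps
              ((g', p, (PySem.Dict.mk cps).getD p [], []) :: (g' + 1, node, rem', anc1) :: S)
              memo (PySem.Set.add visiting p)
termination_by st _ _ => pvMu (pvMaxVal cps + 2) st
decreasing_by
  all_goals simp only [pvMu, List.map, List.sum_cons, pvFw, List.length_cons, List.length_nil]
  · nlinarith [(Nat.pow_pos (show 0 < pvMaxVal cps + 2 by omega) : 0 < (pvMaxVal cps + 2) ^ g)]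
  · nlinarith [(Nat.pow_pos (show 0 < pvMaxVal cps + 2 by omega) : 0 < (pvMaxVal cps + 2) ^ g)]
  · nlinarith [(Nat.pow_pos (show 0 < pvMaxVal cps + 2 by omega) : 0 < (pvMaxVal cps + 2) ^ g)]
  · simp only [pow_zero]; omega
  · have hL := pvGetD_len_le cps p
    have hq : 0 < (pvMaxVal cps + 2) ^ g' :=
      Nat.pow_pos (show 0 < pvMaxVal cps + 2 by omega)
    simp only [Nat.succ_eq_add_one, pow_succ]
    nlinarith [hq, hL, Nat.mul_le_mul_right ((pvMaxVal cps + 2) ^ g') hL]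

def compute_ancestors_alt (class_parents : List (String × List String)) : List (String × List String) :=
  ((class_parents.map (fun q => q.1)).foldl
    (fun memo root =>
      match memo.get? root with
      | some _ => memo                                       -- already computed: skip
      | none =>
        pvRunB class_parents
          [(class_parents.length + (class_parents.map (fun q => q.2.length)).sum, root,
            (PySem.Dict.mk class_parents).getD root [], [])]
          memo (PySem.Set.add PySem.Set.empty root))
    PySem.Dict.empty).items

-- ===== PRECONDITION & SPEC =====
def Spec_compute_ancestors (class_parents : List (String × List String)) (out : List (String × List String)) : Prop := out = compute_ancestors_alt class_parents
instance (class_parents : List (String × List String)) (out : List (String × List String)) : Decidable (Spec_compute_ancestors class_parents out) := by unfold Spec_compute_ancestors; infer_instance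

-- ===== CLAIM (what is proved, stated in full; the proofs are below) =====
def Claim_equal_compute_ancestors : Prop := ∀ (class_parents : List (String × List String)), Dom_compute_ancestors class_parents → Spec_compute_ancestors class_parents (compute_ancestors class_parents)

-- ===== LEMMAS AND PROOFS =====

theorem pv_discard_add (s : PySem.Set String) (x : String)
    (h : PySem.Set.contains s x = false) :
    PySem.Set.discard (PySem.Set.add s x) x = s := by
  simp only [PySem.Set.contains, List.contains_eq_mem, decide_eq_false_iff_not,
    PySem.Set.discard, PySem.Set.add, decide_eq_true_eq] at *
  rw [if_neg h, List.filter_append]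
  simp only [List.filter_cons, List.filter_nil, beq_self_eq_true, Bool.not_true,
    Bool.false_eq_true, ↓reduceIte, List.append_nil]
  exact List.filter_eq_self.mpr (fun a ha => by simp; exact fun e => h (e ▸ ha))

-- the continuation after a frame for `c` finishes with ancestor list `anc`
def pvAfter (cps : List (String × List String))
    (S : List (Nat × String × List String × List String))
    (c : String) (anc : List String)
    (memo : PySem.Dict String (List String)) (vis : PySem.Set String) :
    PySem.Dict String (List String) :=
  match S with
  | [] => memo.insert c anc
  | (g2, n2, rem2, anc2) :: S2 =>
    pvRunB cps
      ((g2, n2, rem2,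
        anc.foldl (fun a ap => if a.contains ap then a else a ++ [ap]) anc2) :: S2)
      (memo.insert c anc) (PySem.Set.discard vis c)

theorem pvMu_cons (W : Nat) (fr : Nat × String × List String × List String)
    (S : List (Nat × String × List String × List String)) :
    pvMu W (fr :: S) = pvFw W fr + pvMu W S := by simp [pvMu]

-- the machine, started on a frame for `c`, runs A's parent loop for `c` and then continues
theorem pvSim (cps : List (String × List String)) :
    ∀ (n g : Nat) (rem anc : List String) (c : String)
      (S : List (Nat × String × List String × List String))
      (memo : PySem.Dict String (List String)) (vis : PySem.Set String),
      pvMu (pvMaxVal cps + 2) ((g, c, rem, anc) :: S) ≤ n →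
      pvRunB cps ((g, c, rem, anc) :: S) memo vis =
        pvAfter cps S c (pvDfsLoopA cps g rem anc memo vis).1
          (pvDfsLoopA cps g rem anc memo vis).2 vis := by
  intro n
  induction n with
  | zero =>
    intro g rem anc c S memo vis hle
    exfalso
    have hp : 0 < (pvMaxVal cps + 2) ^ g :=
      Nat.pow_pos (show 0 < pvMaxVal cps + 2 by omega)
    rw [pvMu_cons] at hle
    simp only [pvFw] at hle
    nlinarith
  | succ n ih =>
    intro g rem anc c S memo vis hle
    have hWpos : 0 < (pvMaxVal cps + 2) ^ g :=
      Nat.pow_pos (show 0 < pvMaxVal cps + 2 by omega)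
    cases rem with
    | nil =>
      cases S with
      | nil => rw [pvRunB.eq_def]; simp [pvDfsLoopA, pvAfter]
      | cons fr S2 =>
        obtain ⟨g2, n2, rem2, anc2⟩ := fr
        rw [pvRunB.eq_def]; simp [pvDfsLoopA, pvAfter]
    | cons p rem' =>
      -- bound for the "consume one parent" recursive call (any anc)
      have hcons : ∀ a : List String,
          pvMu (pvMaxVal cps + 2) ((g, c, rem', a) :: S) ≤ n := by
        intro a
        rw [pvMu_cons] at hle ⊢
        simp only [pvFw, List.length_cons] at hle ⊢
        nlinarith
      cases hm : memo.get? p with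
      | some r =>
        have hR : pvDfsLoopA cps g (p :: rem') anc memo vis =
            pvDfsLoopA cps g rem'
              (r.foldl (fun a ap => if a.contains ap then a else a ++ [ap])
                (if anc.contains p then anc else anc ++ [p]))
              memo vis := by
          conv_lhs => rw [pvDfsLoopA.eq_def]
          simp only [pvDfsA.eq_def, hm]
        rw [pvRunB.eq_def]
        simp only [hm]
        rw [ih _ _ _ _ _ _ _ (hcons _), hR]
      | none =>
        cases hv : PySem.Set.contains vis p with
        | true =>
          have hR : pvDfsLoopA cps g (p :: rem') anc memo vis =
              pvDfsLoopA cps g rem'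
                (if anc.contains p then anc else anc ++ [p]) memo vis := by
            conv_lhs => rw [pvDfsLoopA.eq_def]
            simp only [pvDfsA.eq_def, hm, hv, ↓reduceIte, List.foldl_nil]
          rw [pvRunB.eq_def]
          simp only [hm, hv]
          rw [ih _ _ _ _ _ _ _ (hcons _), hR]
          simp only [↓reduceIte]
        | false =>
          cases g with
          | zero =>
            have hR : pvDfsLoopA cps 0 (p :: rem') anc memo vis =
                pvDfsLoopA cps 0 rem'
                  (if anc.contains p then anc else anc ++ [p]) memo vis := by
              conv_lhs => rw [pvDfsLoopA.eq_def]
              simp only [pvDfsA.eq_def, hm, hv, Bool.false_eq_true, ↓reduceIte, List.foldl_nil]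
            rw [pvRunB.eq_def]
            simp only [hm, hv]
            rw [ih _ _ _ _ _ _ _ (hcons _), hR]
            try simp only [Bool.false_eq_true, ↓reduceIte]
          | succ g' =>
            have hL := pvGetD_len_le cps p
            have hq : 0 < (pvMaxVal cps + 2) ^ g' :=
              Nat.pow_pos (show 0 < pvMaxVal cps + 2 by omega)
            have hpush : pvMu (pvMaxVal cps + 2)
                ((g', p, (PySem.Dict.mk cps).getD p [], []) ::
                 (g' + 1, c, rem', if anc.contains p then anc else anc ++ [p]) :: S) ≤ n := by
              rw [pvMu_cons, pvMu_cons]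
              rw [pvMu_cons] at hle
              simp only [pvFw, List.length_cons, pow_succ] at hle ⊢
              nlinarith [Nat.mul_le_mul_right ((pvMaxVal cps + 2) ^ g') hL]
            have hR : pvDfsLoopA cps (g' + 1) (p :: rem') anc memo vis =
                pvDfsLoopA cps (g' + 1) rem'
                  ((pvDfsLoopA cps g' ((PySem.Dict.mk cps).getD p []) [] memo
                      (PySem.Set.add vis p)).1.foldl
                    (fun a ap => if a.contains ap then a else a ++ [ap])
                    (if anc.contains p then anc else anc ++ [p]))
                  ((pvDfsLoopA cps g' ((PySem.Dict.mk cps).getD p []) [] memo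
                      (PySem.Set.add vis p)).2.insert p
                    (pvDfsLoopA cps g' ((PySem.Dict.mk cps).getD p []) [] memo
                      (PySem.Set.add vis p)).1) vis := by
              conv_lhs => rw [pvDfsLoopA.eq_def]
              simp only [pvDfsA.eq_def, hm, hv, Bool.false_eq_true, ↓reduceIte]
            rw [pvRunB.eq_def]
            simp only [hm, hv, Bool.false_eq_true, ↓reduceIte]
            rw [ih _ _ _ _ _ _ _ hpush]
            rw [pvAfter]
            rw [pv_discard_add vis p hv]
            rw [ih _ _ _ _ _ _ _ (hcons _), hR]

-- ===== VERDICT (by name: the statement is the Claim_ definition above) =====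
theorem pvStep_eq (cps : List (String × List String)) :
    (fun (memo : PySem.Dict String (List String)) (c : String) =>
      (pvDfsA cps (cps.length + (cps.map (fun q => q.2.length)).sum + 1) memo
        PySem.Set.empty c).2) =
    (fun (memo : PySem.Dict String (List String)) (root : String) =>
      match memo.get? root with
      | some _ => memo
      | none =>
        pvRunB cps
          [(cps.length + (cps.map (fun q => q.2.length)).sum, root,
            (PySem.Dict.mk cps).getD root [], [])]
          memo (PySem.Set.add PySem.Set.empty root)) := by
  funext memo c
  cases hm : memo.get? c with
  | some v =>
    rw [pvDfsA.eq_def]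
    simp only [hm]
  | none =>
    rw [pvDfsA.eq_def]
    simp only [hm]
    have hsim := pvSim cps
      (pvMu (pvMaxVal cps + 2)
        [(cps.length + (cps.map (fun q => q.2.length)).sum, c,
          (PySem.Dict.mk cps).getD c [], [])])
      (cps.length + (cps.map (fun q => q.2.length)).sum)
      ((PySem.Dict.mk cps).getD c []) [] c [] memo
      (PySem.Set.add PySem.Set.empty c) (le_refl _)
    rw [pvAfter] at hsim
    rw [hsim]
    simp [PySem.Set.contains, PySem.Set.empty]

theorem compute_ancestors_spec : Claim_equal_compute_ancestors := by
  intro cps _hdom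
  unfold Spec_compute_ancestors compute_ancestors compute_ancestors_alt
  have hkeys : (PySem.Dict.mk cps).keys = cps.map (fun q => q.1) := rfl
  rw [hkeys, pvStep_eq cps]
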